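-- pv_equiv track=rewrite | github.com/himanshukpr/LegalAI | legalai_be/src/legalai_be/tools/simple_legal_tool.py | _get_common_documents
-- ===== SOURCE A (Python) =====
-- def _get_common_documents(query: str) -> list:
--     """Get common documents based on query type"""
--     query_lower = query.lower()
--
--     if any(word in query_lower for word in ["company", "business", "registration"]):
--         return [
--             "Identity proof (Aadhaar, PAN card)",
--             "Address proof documents",
--             "Business plan and details",
--             "NOC from property owner",
--             "Application form (filled)",
--             "Passport size photographs"
--         ]
--     elif any(word in query_lower for word in ["property", "land", "registration"]):
--         return [
--             "Property documents and title deeds",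
--             "Identity and address proof",
--             "Sale agreement/deed",
--             "Encumbrance certificate",
--             "Property tax receipts",
--             "Survey settlement records"
--         ]
--     elif any(word in query_lower for word in ["marriage", "divorce", "family"]):
--         return [
--             "Identity proof documents",
--             "Age proof certificates",
--             "Address proof documents",
--             "Passport size photographs",
--             "Marriage certificate (if applicable)",
--             "Witness documents"
--         ]
--     elif any(word in query_lower for word in ["employment", "labor", "job"]):
--         return [
--             "Employment contract/offer letter",
--             "Identity and address proof",
--             "Educational certificates",
--             "Experience certificates",
--             "Salary slips/bank statements",
--             "Form 16 or tax documents"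
--         ]
--     else:
--         return [
--             "Identity proof (Aadhaar, PAN card)",
--             "Address proof documents",
--             "Relevant certificates/licenses",
--             "Application form (duly filled)",
--             "Passport size photographs",
--             "Supporting documents as required"
--         ]
-- ===== SOURCE B (Python) =====
-- _KEYWORD_CATEGORY = [
--     ("company", 0), ("business", 0), ("registration", 0),
--     ("property", 1), ("land", 1),
--     ("marriage", 2), ("divorce", 2), ("family", 2),
--     ("employment", 3), ("labor", 3), ("job", 3),
-- ]
--
-- _DOCS = [
--     ["Identity proof (Aadhaar, PAN card)",
--      "Address proof documents",
--      "Business plan and details",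
--      "NOC from property owner",
--      "Application form (filled)",
--      "Passport size photographs"],
--     ["Property documents and title deeds",
--      "Identity and address proof",
--      "Sale agreement/deed",
--      "Encumbrance certificate",
--      "Property tax receipts",
--      "Survey settlement records"],
--     ["Identity proof documents",
--      "Age proof certificates",
--      "Address proof documents",
--      "Passport size photographs",
--      "Marriage certificate (if applicable)",
--      "Witness documents"],
--     ["Employment contract/offer letter",
--      "Identity and address proof",
--      "Educational certificates",
--      "Experience certificates",
--      "Salary slips/bank statements",
--      "Form 16 or tax documents"],
--     ["Identity proof (Aadhaar, PAN card)",
--      "Address proof documents",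
--      "Relevant certificates/licenses",
--      "Application form (duly filled)",
--      "Passport size photographs",
--      "Supporting documents as required"],
-- ]
--
-- def _get_common_documents(query: str) -> list:
--     """Get common documents: best (lowest) category among all matched keywords.
--
--     Each keyword is mapped to the index of its document list ("registration"
--     to 0, the company branch, since that branch is checked first); the answer
--     is the document list of the minimal matched category, _DOCS[4] (the
--     default list) when no keyword matches.
--     """
--     query_lower = query.lower()
--     best = min((cat for kw, cat in _KEYWORD_CATEGORY if kw in query_lower),
--                default=4)
--     return _DOCS[best]
-- ===== Notes on version B (the rewrite author's own statement) =====
-- stated objective: simpler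
-- what changed: Replaced the four-branch if/elif chain of grouped any()-checks by a flat keyword-to-category map aggregated with min (the answer is the document list of the lowest matched category, with a default-index sentinel), so dispatch becomes one comprehension plus an index instead of ordered branches.
import Mathlib
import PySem

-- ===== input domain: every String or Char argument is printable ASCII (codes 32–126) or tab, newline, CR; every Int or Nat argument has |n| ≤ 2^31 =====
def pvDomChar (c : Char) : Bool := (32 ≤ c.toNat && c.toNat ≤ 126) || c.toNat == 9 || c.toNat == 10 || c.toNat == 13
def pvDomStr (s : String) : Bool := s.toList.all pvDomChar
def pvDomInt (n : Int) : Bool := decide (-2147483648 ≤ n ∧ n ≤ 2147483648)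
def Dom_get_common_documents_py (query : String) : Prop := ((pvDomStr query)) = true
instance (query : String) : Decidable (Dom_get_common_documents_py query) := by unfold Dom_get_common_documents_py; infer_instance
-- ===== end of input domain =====

-- B replaces the four-branch if/elif chain by a flat keyword→category map aggregated with min
-- (lowest matched category's document list, default when none matches); objective: simpler, same values.


-- ===== PORT A =====
-- literal transliteration of A's if/elif chain
def get_common_documents_py (query : String) : List String :=
  let query_lower := PySem.Str.lower query
  if ["company", "business", "registration"].any (fun word => PySem.Str.isIn word query_lower) then
    ["Identity proof (Aadhaar, PAN card)",
     "Address proof documents",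
     "Business plan and details",
     "NOC from property owner",
     "Application form (filled)",
     "Passport size photographs"]
  else if ["property", "land", "registration"].any (fun word => PySem.Str.isIn word query_lower) then
    ["Property documents and title deeds",
     "Identity and address proof",
     "Sale agreement/deed",
     "Encumbrance certificate",
     "Property tax receipts",
     "Survey settlement records"]
  else if ["marriage", "divorce", "family"].any (fun word => PySem.Str.isIn word query_lower) then
    ["Identity proof documents",
     "Age proof certificates",
     "Address proof documents",
     "Passport size photographs",
     "Marriage certificate (if applicable)",
     "Witness documents"]
  else if ["employment", "labor", "job"].any (fun word => PySem.Str.isIn word query_lower) then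
    ["Employment contract/offer letter",
     "Identity and address proof",
     "Educational certificates",
     "Experience certificates",
     "Salary slips/bank statements",
     "Form 16 or tax documents"]
  else
    ["Identity proof (Aadhaar, PAN card)",
     "Address proof documents",
     "Relevant certificates/licenses",
     "Application form (duly filled)",
     "Passport size photographs",
     "Supporting documents as required"]

-- ===== PORT B =====
-- B: flat keyword→category map; the answer is the document list of the MINIMAL matched
-- category (min with default 4 = the default list). No branch chain, no early exit.
def pvKeywordCategory : List (String × Nat) :=
  [("company", 0), ("business", 0), ("registration", 0),
   ("property", 1), ("land", 1),
   ("marriage", 2), ("divorce", 2), ("family", 2),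
   ("employment", 3), ("labor", 3), ("job", 3)]

def pvDocs : List (List String) :=
  [["Identity proof (Aadhaar, PAN card)",
    "Address proof documents",
    "Business plan and details",
    "NOC from property owner",
    "Application form (filled)",
    "Passport size photographs"],
   ["Property documents and title deeds",
    "Identity and address proof",
    "Sale agreement/deed",
    "Encumbrance certificate",
    "Property tax receipts",
    "Survey settlement records"],
   ["Identity proof documents",
    "Age proof certificates",
    "Address proof documents",
    "Passport size photographs",
    "Marriage certificate (if applicable)",
    "Witness documents"],
   ["Employment contract/offer letter",
    "Identity and address proof",
    "Educational certificates",
    "Experience certificates",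
    "Salary slips/bank statements",
    "Form 16 or tax documents"],
   ["Identity proof (Aadhaar, PAN card)",
    "Address proof documents",
    "Relevant certificates/licenses",
    "Application form (duly filled)",
    "Passport size photographs",
    "Supporting documents as required"]]

def get_common_documents_py_alt (query : String) : List String :=
  let query_lower := PySem.Str.lower query
  -- min((cat for kw, cat in _KEYWORD_CATEGORY if kw in query_lower), default=4)
  let best := (PySem.List.min?
      (pvKeywordCategory.filterMap
        (fun kc => if PySem.Str.isIn kc.1 query_lower then some kc.2 else none))
      (fun c => c)).getD 4
  -- _DOCS[best]: best ≤ 4 always, so the index is in range (getD's [] is never used)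
  pvDocs.getD best []

-- ===== PRECONDITION & SPEC =====
def Spec_get_common_documents_py (query : String) (out : List String) : Prop := out = get_common_documents_py_alt query
instance (query : String) (out : List String) : Decidable (Spec_get_common_documents_py query out) := by unfold Spec_get_common_documents_py; infer_instance

-- ===== CLAIM =====
def Claim_equal_get_common_documents_py : Prop := ∀ (query : String), Dom_get_common_documents_py query → Spec_get_common_documents_py query (get_common_documents_py query)

-- ===== LEMMAS AND PROOFS =====
-- membership characterization of B's matched-category list, one category at a time
theorem pv_mem0 (ql : String) :
    (0 ∈ List.filterMap (fun kc : String × Nat => if PySem.Str.isIn kc.1 ql then some kc.2 else none) pvKeywordCategory) ↔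
      (PySem.Str.isIn "company" ql = true ∨ PySem.Str.isIn "business" ql = true ∨ PySem.Str.isIn "registration" ql = true) := by
  simp [pvKeywordCategory, List.mem_filterMap]

theorem pv_mem1 (ql : String) :
    (1 ∈ List.filterMap (fun kc : String × Nat => if PySem.Str.isIn kc.1 ql then some kc.2 else none) pvKeywordCategory) ↔
      (PySem.Str.isIn "property" ql = true ∨ PySem.Str.isIn "land" ql = true) := by
  simp [pvKeywordCategory, List.mem_filterMap]

theorem pv_mem2 (ql : String) :
    (2 ∈ List.filterMap (fun kc : String × Nat => if PySem.Str.isIn kc.1 ql then some kc.2 else none) pvKeywordCategory) ↔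
      (PySem.Str.isIn "marriage" ql = true ∨ PySem.Str.isIn "divorce" ql = true ∨ PySem.Str.isIn "family" ql = true) := by
  simp [pvKeywordCategory, List.mem_filterMap]

theorem pv_mem3 (ql : String) :
    (3 ∈ List.filterMap (fun kc : String × Nat => if PySem.Str.isIn kc.1 ql then some kc.2 else none) pvKeywordCategory) ↔
      (PySem.Str.isIn "employment" ql = true ∨ PySem.Str.isIn "labor" ql = true ∨ PySem.Str.isIn "job" ql = true) := by
  simp [pvKeywordCategory, List.mem_filterMap]

theorem pv_sub (ql : String) :
    ∀ x ∈ List.filterMap (fun kc : String × Nat => if PySem.Str.isIn kc.1 ql then some kc.2 else none) pvKeywordCategory, x ≤ 3 := by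
  intro x hx
  simp [pvKeywordCategory, List.mem_filterMap] at hx
  rcases hx with ⟨a, ha, h⟩ | h | h | h <;> omega

-- min? with the identity key returns exactly the minimum element
theorem pv_min_eq {M : List Nat} {k : Nat} (hk : k ∈ M) (hlb : ∀ y ∈ M, k ≤ y) :
    PySem.List.min? M (fun c => c) = some k := by
  cases hmin : PySem.List.min? M (fun c => c) with
  | none =>
    rw [PySem.List.min?_eq_none_iff] at hmin
    subst hmin; cases hk
  | some m =>
    have h1 : m ≤ k := PySem.List.min?_isMin hmin k hk
    have h2 : k ≤ m := hlb m (PySem.List.min?_mem hmin)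
    rw [Nat.le_antisymm h1 h2]

-- ===== VERDICT =====
theorem get_common_documents_py_spec : Claim_equal_get_common_documents_py := by
  intro query _
  unfold Spec_get_common_documents_py
  simp only [get_common_documents_py, get_common_documents_py_alt,
    List.any_cons, List.any_nil, Bool.or_false]
  set ql := PySem.Str.lower query with hql
  set M := List.filterMap (fun kc : String × Nat => if PySem.Str.isIn kc.1 ql then some kc.2 else none) pvKeywordCategory with hM
  by_cases h0 : PySem.Str.isIn "company" ql = true ∨ PySem.Str.isIn "business" ql = true ∨ PySem.Str.isIn "registration" ql = true
  · have hmin : PySem.List.min? M (fun c => c) = some 0 :=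
      pv_min_eq ((pv_mem0 ql).mpr h0) (fun y _ => Nat.zero_le y)
    have hA : (PySem.Str.isIn "company" ql || (PySem.Str.isIn "business" ql || PySem.Str.isIn "registration" ql)) = true := by
      rcases h0 with h | h | h <;> simp only [h, Bool.true_or, Bool.or_true]
    rw [hmin, if_pos hA]
    rfl
  · simp only [not_or] at h0
    obtain ⟨e1, e2, e3⟩ := h0
    simp only [Bool.not_eq_true] at e1 e2 e3
    have hf0 : ¬ ((PySem.Str.isIn "company" ql || (PySem.Str.isIn "business" ql || PySem.Str.isIn "registration" ql)) = true) := by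
      simp only [e1, e2, e3, Bool.or_false]
      exact Bool.false_ne_true
    have hn0 : ¬ (0 ∈ M) := fun h => hf0 (by
      rcases (pv_mem0 ql).mp h with h | h | h <;> simp only [h, Bool.true_or, Bool.or_true])
    by_cases h1 : PySem.Str.isIn "property" ql = true ∨ PySem.Str.isIn "land" ql = true
    · have hmin : PySem.List.min? M (fun c => c) = some 1 := by
        apply pv_min_eq ((pv_mem1 ql).mpr h1)
        intro y hy
        rcases Nat.eq_zero_or_pos y with h | h
        · exact absurd (h ▸ hy) hn0
        · omega
      have hA : (PySem.Str.isIn "property" ql || (PySem.Str.isIn "land" ql || PySem.Str.isIn "registration" ql)) = true := by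
        rcases h1 with h | h <;> simp only [h, Bool.true_or, Bool.or_true]
      rw [hmin, if_neg hf0, if_pos hA]
      rfl
    · simp only [not_or] at h1
      obtain ⟨e4, e5⟩ := h1
      simp only [Bool.not_eq_true] at e4 e5
      have hf1 : ¬ ((PySem.Str.isIn "property" ql || (PySem.Str.isIn "land" ql || PySem.Str.isIn "registration" ql)) = true) := by
        simp only [e3, e4, e5, Bool.or_false]
        exact Bool.false_ne_true
      have hn1 : ¬ (1 ∈ M) := fun h => hf1 (by
        rcases (pv_mem1 ql).mp h with h | h <;> simp only [h, Bool.true_or, Bool.or_true])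
      by_cases h2 : PySem.Str.isIn "marriage" ql = true ∨ PySem.Str.isIn "divorce" ql = true ∨ PySem.Str.isIn "family" ql = true
      · have hmin : PySem.List.min? M (fun c => c) = some 2 := by
          apply pv_min_eq ((pv_mem2 ql).mpr h2)
          intro y hy
          rcases Nat.lt_or_ge y 2 with h | h
          · interval_cases y
            · exact absurd hy hn0
            · exact absurd hy hn1
          · omega
        have hA : (PySem.Str.isIn "marriage" ql || (PySem.Str.isIn "divorce" ql || PySem.Str.isIn "family" ql)) = true := by
          rcases h2 with h | h | h <;> simp only [h, Bool.true_or, Bool.or_true]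
        rw [hmin, if_neg hf0, if_neg hf1, if_pos hA]
        rfl
      · simp only [not_or] at h2
        obtain ⟨e6, e7, e8⟩ := h2
        simp only [Bool.not_eq_true] at e6 e7 e8
        have hf2 : ¬ ((PySem.Str.isIn "marriage" ql || (PySem.Str.isIn "divorce" ql || PySem.Str.isIn "family" ql)) = true) := by
          simp only [e6, e7, e8, Bool.or_false]
          exact Bool.false_ne_true
        have hn2 : ¬ (2 ∈ M) := fun h => hf2 (by
          rcases (pv_mem2 ql).mp h with h | h | h <;> simp only [h, Bool.true_or, Bool.or_true])
        by_cases h3 : PySem.Str.isIn "employment" ql = true ∨ PySem.Str.isIn "labor" ql = true ∨ PySem.Str.isIn "job" ql = true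
        · have hmin : PySem.List.min? M (fun c => c) = some 3 := by
            apply pv_min_eq ((pv_mem3 ql).mpr h3)
            intro y hy
            rcases Nat.lt_or_ge y 3 with h | h
            · interval_cases y
              · exact absurd hy hn0
              · exact absurd hy hn1
              · exact absurd hy hn2
            · omega
          have hA : (PySem.Str.isIn "employment" ql || (PySem.Str.isIn "labor" ql || PySem.Str.isIn "job" ql)) = true := by
            rcases h3 with h | h | h <;> simp only [h, Bool.true_or, Bool.or_true]
          rw [hmin, if_neg hf0, if_neg hf1, if_neg hf2, if_pos hA]
          rfl
        · simp only [not_or] at h3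
          obtain ⟨e9, e10, e11⟩ := h3
          simp only [Bool.not_eq_true] at e9 e10 e11
          have hf3 : ¬ ((PySem.Str.isIn "employment" ql || (PySem.Str.isIn "labor" ql || PySem.Str.isIn "job" ql)) = true) := by
            simp only [e9, e10, e11, Bool.or_false]
            exact Bool.false_ne_true
          have hn3 : ¬ (3 ∈ M) := fun h => hf3 (by
            rcases (pv_mem3 ql).mp h with h | h | h <;> simp only [h, Bool.true_or, Bool.or_true])
          have hMnil : M = [] := by
            rw [List.eq_nil_iff_forall_not_mem]
            intro x hx
            have hle : x ≤ 3 := pv_sub ql x (hM ▸ hx)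
            interval_cases x
            · exact hn0 hx
            · exact hn1 hx
            · exact hn2 hx
            · exact hn3 hx
          have hmin : PySem.List.min? M (fun c => c) = none := by
            rw [PySem.List.min?_eq_none_iff]; exact hMnil
          rw [hmin, if_neg hf0, if_neg hf1, if_neg hf2, if_neg hf3]
          rfl
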